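-- pv_equiv track=rewrite | github.com/KimJonghoSNU/Abstraction_gap | scripts/analysis/analyze_round6_vs_baseline3_derailment.py | _anchor_branches_from_selected
-- ===== SOURCE A (Python) =====
-- from typing import Any, Dict, List, Optional, Sequence, Tuple
--
-- def _branch_prefix(path: Sequence[int], depth: int) -> Optional[Tuple[int, ...]]:
--     if len(path) < 2:
--         return None
--     use_depth = min(int(depth), len(path) - 1)
--     if use_depth <= 0:
--         return None
--     return tuple(path[:use_depth])
--
-- def _gold_branches_at_depth(gold_paths: Sequence[Sequence[int]], depth: int) -> List[Tuple[int, ...]]: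
--     branches = []
--     seen = set()
--     for gold_path in gold_paths:
--         branch = _branch_prefix(gold_path, depth)
--         if branch is None or branch in seen:
--             continue
--         seen.add(branch)
--         branches.append(branch)
--     return branches
--
-- def _path_consistent_with_branch(path: Sequence[int], branch: Sequence[int]) -> bool:
--     if not path or not branch:
--         return False
--     limit = min(len(path), len(branch))
--     return tuple(path[:limit]) == tuple(branch[:limit])
--
-- def _anchor_branches_from_selected(
--     selected_paths: Sequence[Sequence[int]],
--     gold_paths: Sequence[Sequence[int]],
--     depth: int,
-- ) -> List[Tuple[int, ...]]:
--     gold_branches = _gold_branches_at_depth(gold_paths, depth)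
--     anchors = []
--     for gold_branch in gold_branches:
--         if any(_path_consistent_with_branch(path, gold_branch) for path in selected_paths):
--             anchors.append(gold_branch)
--     # Intent: round6 anchor should reflect gold branch regions already covered by the explicit branch state.
--     return sorted({tuple(path) for path in anchors})
-- ===== SOURCE B (Python) =====
-- def _anchor_branches_from_selected(selected_paths, gold_paths, depth):
--     # Index the selected paths once: the set of full paths and the set of all
--     # their non-empty prefixes.  A gold branch b is covered iff b is a prefix of
--     # some selected path (b in prefixes) or some selected path is a proper
--     # prefix of b (b[:i] in full).  This replaces A's scan of all selected
--     # paths per gold branch by O(len(b)) hash lookups.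
--     full = set()
--     prefixes = set()
--     for p in selected_paths:
--         t = tuple(p)
--         if not t:
--             continue
--         full.add(t)
--         for i in range(1, len(t) + 1):
--             prefixes.add(t[:i])
--     anchors = set()
--     for g in gold_paths:
--         if len(g) < 2:
--             continue
--         d = min(int(depth), len(g) - 1)
--         if d <= 0:
--             continue
--         b = tuple(g[:d])
--         if b in prefixes or any(b[:i] in full for i in range(1, len(b))):
--             anchors.add(b)
--     return sorted(anchors)
-- ===== Notes on version B (the rewrite author's own statement) =====
-- stated objective: alternative
-- what changed: Instead of scanning every selected path for every gold branch with an elementwise consistency test, B builds a prefix index of the selected paths once (set of full paths and set of all their non-empty prefixes) and decides each gold branch by set-membership lookups on its prefixes; it also drops the separate 'seen' dedup pass since the result is a sorted set anyway.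
import Mathlib
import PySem

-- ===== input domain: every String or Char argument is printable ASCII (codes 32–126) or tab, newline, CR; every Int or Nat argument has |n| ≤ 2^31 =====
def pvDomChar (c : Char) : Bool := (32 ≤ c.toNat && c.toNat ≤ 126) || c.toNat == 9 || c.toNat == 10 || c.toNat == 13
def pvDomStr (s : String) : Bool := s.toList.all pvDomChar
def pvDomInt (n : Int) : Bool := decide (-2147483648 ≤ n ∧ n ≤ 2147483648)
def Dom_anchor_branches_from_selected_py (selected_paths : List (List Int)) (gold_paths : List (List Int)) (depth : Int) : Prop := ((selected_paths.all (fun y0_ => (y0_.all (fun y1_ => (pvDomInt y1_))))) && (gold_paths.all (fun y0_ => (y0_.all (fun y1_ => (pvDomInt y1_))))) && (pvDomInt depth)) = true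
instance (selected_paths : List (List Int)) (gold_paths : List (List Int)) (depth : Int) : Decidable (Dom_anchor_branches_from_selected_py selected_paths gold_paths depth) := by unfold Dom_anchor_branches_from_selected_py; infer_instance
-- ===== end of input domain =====

-- B: instead of A's per-gold-branch scan over all selected paths, build a prefix index
-- (set of selected paths, set of their non-empty prefixes) once and answer each gold
-- branch by membership lookups on its prefixes (alternative algorithm, same exact value).

-- ===== PORT A =====
-- _branch_prefix
def pvBranchPrefix (path : List Int) (depth : Int) : Option (List Int) :=
  if path.length < 2 then none
  else
    let use_depth := min depth ((path.length : Int) - 1)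
    if use_depth ≤ 0 then none
    else some (PySem.List.slice path none (some use_depth))

-- loop body of _gold_branches_at_depth (state = (branches, seen))
def pvGoldStep (depth : Int) (st : List (List Int) × PySem.Set (List Int)) (gold_path : List Int) :
    List (List Int) × PySem.Set (List Int) :=
  match pvBranchPrefix gold_path depth with
  | none => st
  | some branch =>
    if PySem.Set.contains st.2 branch then st else (st.1 ++ [branch], PySem.Set.add st.2 branch)

-- _gold_branches_at_depth
def pvGoldBranches (gold_paths : List (List Int)) (depth : Int) : List (List Int) :=
  (gold_paths.foldl (pvGoldStep depth) ([], PySem.Set.empty)).1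

-- _path_consistent_with_branch  (path[:limit] with limit = min of the lengths: take limit, exact)
def pvConsistent (path branch : List Int) : Bool :=
  if path.isEmpty || branch.isEmpty then false
  else
    let limit := min path.length branch.length
    path.take limit == branch.take limit

def anchor_branches_from_selected_py (selected_paths : List (List Int)) (gold_paths : List (List Int)) (depth : Int) : List (List Int) :=
  let gold_branches := pvGoldBranches gold_paths depth
  let anchors := gold_branches.foldl
    (fun acc gold_branch =>
      if selected_paths.any (fun path => pvConsistent path gold_branch) then acc ++ [gold_branch]
      else acc) []
  PySem.List.sorted (PySem.Set.ofList anchors) (fun x => x) false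

-- ===== PORT B =====
-- body of B's first loop: index one selected path (state = (full, prefixes));
-- t[:i] with 1 ≤ i from range(1, len(t)+1): take i.toNat, exact
def pvIndexStep (st : PySem.Set (List Int) × PySem.Set (List Int)) (t : List Int) :
    PySem.Set (List Int) × PySem.Set (List Int) :=
  if t.isEmpty then st
  else (PySem.Set.add st.1 t,
        (PySem.List.pyRange 1 ((t.length : Int) + 1) 1).foldl
          (fun s i => PySem.Set.add s (t.take i.toNat)) st.2)

-- body of B's second loop: decide one gold path (b[:i] with 1 ≤ i: take i.toNat, exact)
def pvAnchorStep (full prefixes : PySem.Set (List Int)) (depth : Int)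
    (anchors : PySem.Set (List Int)) (g : List Int) : PySem.Set (List Int) :=
  if g.length < 2 then anchors
  else
    let d := min depth ((g.length : Int) - 1)
    if d ≤ 0 then anchors
    else
      let b := PySem.List.slice g none (some d)
      if PySem.Set.contains prefixes b ||
         (PySem.List.pyRange 1 (b.length : Int) 1).any
           (fun i => PySem.Set.contains full (b.take i.toNat))
      then PySem.Set.add anchors b
      else anchors

def anchor_branches_from_selected_py_alt (selected_paths : List (List Int)) (gold_paths : List (List Int)) (depth : Int) : List (List Int) :=
  let idx := selected_paths.foldl pvIndexStep (PySem.Set.empty, PySem.Set.empty)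
  let anchors := gold_paths.foldl (pvAnchorStep idx.1 idx.2 depth) PySem.Set.empty
  PySem.List.sorted anchors (fun x => x) false

-- ===== PRECONDITION & SPEC =====
def Spec_anchor_branches_from_selected_py (selected_paths : List (List Int)) (gold_paths : List (List Int)) (depth : Int) (out : List (List Int)) : Prop := out = anchor_branches_from_selected_py_alt selected_paths gold_paths depth
instance (selected_paths : List (List Int)) (gold_paths : List (List Int)) (depth : Int) (out : List (List Int)) : Decidable (Spec_anchor_branches_from_selected_py selected_paths gold_paths depth out) := by unfold Spec_anchor_branches_from_selected_py; infer_instance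

-- ===== CLAIM (what is proved, stated in full; the proofs are below) =====
def Claim_equal_anchor_branches_from_selected_py : Prop := ∀ (selected_paths : List (List Int)) (gold_paths : List (List Int)) (depth : Int), Dom_anchor_branches_from_selected_py selected_paths gold_paths depth → Spec_anchor_branches_from_selected_py selected_paths gold_paths depth (anchor_branches_from_selected_py selected_paths gold_paths depth)

-- ===== LEMMAS AND PROOFS =====

-- a defined branch prefix is a non-empty proper-length prefix
lemma pvBranchPrefix_eq_some_iff (g : List Int) (depth : Int) (x : List Int) :
    pvBranchPrefix g depth = some x ↔
      ¬ g.length < 2 ∧ 0 < min depth ((g.length : Int) - 1) ∧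
        x = g.take (min depth ((g.length : Int) - 1)).toNat := by
  unfold pvBranchPrefix
  by_cases h1 : g.length < 2
  · simp [h1]
  · by_cases h2 : min depth ((g.length : Int) - 1) ≤ 0
    · simp only [if_neg h1, if_pos h2]
      simp only [reduceCtorEq, false_iff, not_and]
      intro _ h3
      omega
    · simp only [if_neg h1, if_neg h2]
      rw [PySem.List.slice_to (xs := g) (b := min depth ((g.length : Int) - 1)) (by omega)]
      constructor
      · intro h; exact ⟨h1, by omega, (Option.some_inj.mp h).symm⟩
      · intro ⟨_, _, h⟩; exact congrArg some h.symm

lemma pvBranchPrefix_ne_nil {g : List Int} {depth : Int} {x : List Int}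
    (h : pvBranchPrefix g depth = some x) : x ≠ [] := by
  rw [pvBranchPrefix_eq_some_iff] at h
  obtain ⟨h1, h2, h3⟩ := h
  subst h3
  simp only [ne_eq, List.take_eq_nil_iff, not_or]
  refine ⟨by omega, ?_⟩
  rintro rfl
  simp at h1

-- pvConsistent p b ↔ one of p, b is a (non-empty) prefix of the other
lemma pvConsistent_iff (p b : List Int) :
    pvConsistent p b = true ↔ p ≠ [] ∧ b ≠ [] ∧ (p <+: b ∨ b <+: p) := by
  unfold pvConsistent
  split
  · rename_i h
    simp only [List.isEmpty_iff, Bool.or_eq_true] at h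
    simp only [Bool.false_eq_true, false_iff]
    rintro ⟨hp, hb, _⟩; rcases h with h | h <;> [exact hp h; exact hb h]
  · rename_i h
    simp only [List.isEmpty_iff, Bool.or_eq_true, not_or] at h
    obtain ⟨hp, hb⟩ := h
    simp only [beq_iff_eq]
    constructor
    · intro ht
      refine ⟨hp, hb, ?_⟩
      rcases Nat.le_total p.length b.length with hle | hle
      · left
        rw [List.prefix_iff_eq_take]
        rw [min_eq_left hle, List.take_of_length_le (le_refl _)] at ht
        exact ht
      · right
        rw [List.prefix_iff_eq_take]
        rw [min_eq_right hle, List.take_of_length_le (le_refl _)] at ht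
        exact ht.symm
    · rintro ⟨_, _, hpre | hpre⟩
      · have hl := hpre.length_le
        rw [min_eq_left hl, List.take_of_length_le (le_refl _)]
        exact List.prefix_iff_eq_take.mp hpre
      · have hl := hpre.length_le
        rw [min_eq_right hl, List.take_of_length_le (le_refl _)]
        exact (List.prefix_iff_eq_take.mp hpre).symm

-- covA: A's per-branch scan of the selected paths
lemma covA_iff (S : List (List Int)) (b : List Int) :
    (S.any (fun path => pvConsistent path b)) = true ↔
      ∃ p ∈ S, p ≠ [] ∧ b ≠ [] ∧ (p <+: b ∨ b <+: p) := by
  simp only [List.any_eq_true, pvConsistent_iff]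

-- membership in B's index (full paths component)
lemma mem_indexFold_fst (S : List (List Int)) (st : PySem.Set (List Int) × PySem.Set (List Int))
    (x : List Int) :
    x ∈ (S.foldl pvIndexStep st).1 ↔ x ∈ st.1 ∨ (x ∈ S ∧ x ≠ []) := by
  induction S generalizing st with
  | nil => simp
  | cons t S ih =>
    simp only [List.foldl_cons, ih, List.mem_cons]
    unfold pvIndexStep
    split
    · rename_i h
      simp only [List.isEmpty_iff] at h
      subst h
      constructor
      · rintro (h | h) <;> tauto
      · rintro (h | ⟨(h | h), hne⟩) <;> tauto
    · rename_i h
      simp only [List.isEmpty_iff] at h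
      simp only [PySem.Set.mem_add]
      constructor
      · rintro ((h1 | h1) | h1)
        · tauto
        · exact Or.inr ⟨Or.inl h1, h1 ▸ h⟩
        · tauto
      · rintro (h1 | ⟨(h1 | h1), hne⟩)
        · tauto
        · subst h1; tauto
        · tauto

-- membership in B's index (prefixes component)
lemma mem_indexFold_snd (S : List (List Int)) (st : PySem.Set (List Int) × PySem.Set (List Int))
    (x : List Int) :
    x ∈ (S.foldl pvIndexStep st).2 ↔ x ∈ st.2 ∨ ∃ p ∈ S, x ≠ [] ∧ x <+: p := by
  induction S generalizing st with
  | nil => simp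
  | cons t S ih =>
    simp only [List.foldl_cons, ih, List.mem_cons]
    unfold pvIndexStep
    split
    · rename_i h
      simp only [List.isEmpty_iff] at h
      subst h
      constructor
      · rintro (h | h)
        · tauto
        · right; obtain ⟨p, hp, h2, h3⟩ := h; exact ⟨p, Or.inr hp, h2, h3⟩
      · rintro (h | ⟨p, (hp | hp), h2, h3⟩)
        · tauto
        · subst hp; exact absurd (List.prefix_nil.mp h3) h2
        · exact Or.inr ⟨p, hp, h2, h3⟩
    · rename_i ht
      simp only [List.isEmpty_iff] at ht
      rw [PySem.Set.mem_foldl_add]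
      constructor
      · rintro ((h | ⟨i, hi, hx⟩) | ⟨p, hp, h2, h3⟩)
        · tauto
        · rw [PySem.List.mem_pyRange_one] at hi
          right
          refine ⟨t, Or.inl rfl, ?_, hx ▸ List.take_prefix _ _⟩
          subst hx
          simp only [ne_eq, List.take_eq_nil_iff, not_or]
          exact ⟨by omega, ht⟩
        · exact Or.inr ⟨p, Or.inr hp, h2, h3⟩
      · rintro (h | ⟨p, (hp | hp), h2, h3⟩)
        · tauto
        · subst hp
          left; right
          refine ⟨(x.length : Int), ?_, ?_⟩
          · rw [PySem.List.mem_pyRange_one]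
            have h4 := h3.length_le
            have h5 : 1 ≤ x.length := by
              cases x with | nil => exact absurd rfl h2 | cons _ _ => simp
            omega
          · simp only [Int.toNat_natCast]
            exact (List.prefix_iff_eq_take.mp h3)
        · exact Or.inr ⟨p, hp, h2, h3⟩

-- covB: B's index query
lemma covB_iff (S : List (List Int)) (b : List Int) (hb : b ≠ []) :
    (PySem.Set.contains (S.foldl pvIndexStep (PySem.Set.empty, PySem.Set.empty)).2 b ||
      (PySem.List.pyRange 1 (b.length : Int) 1).any
        (fun i => PySem.Set.contains (S.foldl pvIndexStep (PySem.Set.empty, PySem.Set.empty)).1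
          (b.take i.toNat))) = true ↔
      ∃ p ∈ S, p ≠ [] ∧ (p <+: b ∨ b <+: p) := by
  rw [Bool.or_eq_true, List.any_eq_true]
  simp only [PySem.Set.contains_iff, mem_indexFold_fst, mem_indexFold_snd]
  constructor
  · rintro (h | ⟨i, hi, h⟩)
    · rcases h with h | ⟨p, hp, h2, h3⟩
      · simp [PySem.Set.empty] at h
      · refine ⟨p, hp, ?_, Or.inr h3⟩
        intro hpe; subst hpe; exact h2 (List.prefix_nil.mp h3)
    · rw [PySem.List.mem_pyRange_one] at hi
      rcases h with h | ⟨hmem, hne⟩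
      · simp [PySem.Set.empty] at h
      · refine ⟨b.take i.toNat, hmem, hne, Or.inl (List.take_prefix _ _)⟩
  · rintro ⟨p, hp, hne, hpre | hpre⟩
    · by_cases hlen : p.length = b.length
      · left; right
        have hpb : p = b := hpre.eq_of_length hlen
        subst hpb
        exact ⟨p, hp, hb, List.prefix_refl p⟩
      · right
        refine ⟨(p.length : Int), ?_, ?_⟩
        · rw [PySem.List.mem_pyRange_one]
          have h4 := hpre.length_le
          have h5 : 1 ≤ p.length := by
            cases p with | nil => exact absurd rfl hne | cons _ _ => simp
          omega
        · simp only [Int.toNat_natCast]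
          have heq : b.take p.length = p := (List.prefix_iff_eq_take.mp hpre).symm
          rw [heq]
          exact Or.inr ⟨hp, hne⟩
    · left; right; exact ⟨p, hp, hb, hpre⟩

-- membership in A's gold-branch list (the 'seen' set dedups but keeps membership)
lemma mem_goldFold (G : List (List Int)) (depth : Int) (st : List (List Int) × PySem.Set (List Int))
    (hinv : ∀ y, y ∈ st.1 ↔ y ∈ st.2) (x : List Int) :
    x ∈ (G.foldl (pvGoldStep depth) st).1 ↔ x ∈ st.1 ∨ ∃ g ∈ G, pvBranchPrefix g depth = some x := by
  induction G generalizing st with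
  | nil => simp
  | cons g G ih =>
    simp only [List.foldl_cons, List.mem_cons]
    cases hbp : pvBranchPrefix g depth with
    | none =>
      rw [show pvGoldStep depth st g = st from by unfold pvGoldStep; rw [hbp], ih st hinv]
      constructor
      · rintro (h | ⟨g', hg', h⟩)
        · tauto
        · exact Or.inr ⟨g', Or.inr hg', h⟩
      · rintro (h | ⟨g', (hg' | hg'), h⟩)
        · tauto
        · subst hg'; rw [hbp] at h; exact absurd h (by simp)
        · exact Or.inr ⟨g', hg', h⟩
    | some b =>
      by_cases hc : PySem.Set.contains st.2 b = true
      · rw [show pvGoldStep depth st g = st from by unfold pvGoldStep; rw [hbp]; dsimp only; rw [if_pos hc],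
           ih st hinv]
        rw [PySem.Set.contains_iff] at hc
        constructor
        · rintro (h | ⟨g', hg', h⟩)
          · tauto
          · exact Or.inr ⟨g', Or.inr hg', h⟩
        · rintro (h | ⟨g', (hg' | hg'), h⟩)
          · tauto
          · subst hg'; rw [hbp] at h
            left; rw [hinv]; exact (Option.some_inj.mp h) ▸ hc
          · exact Or.inr ⟨g', hg', h⟩
      · rw [show pvGoldStep depth st g = (st.1 ++ [b], PySem.Set.add st.2 b) from by
              unfold pvGoldStep; rw [hbp]; dsimp only; rw [if_neg hc],
           ih (st.1 ++ [b], PySem.Set.add st.2 b)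
              (by intro y; simp only [List.mem_append, List.mem_singleton, PySem.Set.mem_add,
                    hinv y])]
        simp only [List.mem_append, List.mem_singleton]
        constructor
        · rintro ((h | h) | ⟨g', hg', h⟩)
          · tauto
          · subst h; exact Or.inr ⟨g, Or.inl rfl, hbp⟩
          · exact Or.inr ⟨g', Or.inr hg', h⟩
        · rintro (h | ⟨g', (hg' | hg'), h⟩)
          · tauto
          · subst hg'; rw [hbp] at h; left; right; exact (Option.some_inj.mp h).symm
          · exact Or.inr ⟨g', hg', h⟩

-- membership in B's anchors set
lemma pvAnchorStep_eq (full prefixes : PySem.Set (List Int)) (depth : Int)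
    (acc : PySem.Set (List Int)) (g : List Int) :
    pvAnchorStep full prefixes depth acc g =
      match pvBranchPrefix g depth with
      | none => acc
      | some b =>
        if (PySem.Set.contains prefixes b ||
            (PySem.List.pyRange 1 (b.length : Int) 1).any
              (fun i => PySem.Set.contains full (b.take i.toNat)))
        then PySem.Set.add acc b else acc := by
  unfold pvAnchorStep pvBranchPrefix
  by_cases h1 : g.length < 2
  · simp [h1]
  · by_cases h2 : min depth ((g.length : Int) - 1) ≤ 0
    · simp [h1, h2]
    · simp [h1, h2]

lemma mem_anchorFold (G : List (List Int)) (full prefixes : PySem.Set (List Int)) (depth : Int)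
    (acc : PySem.Set (List Int)) (x : List Int) :
    x ∈ G.foldl (pvAnchorStep full prefixes depth) acc ↔
      x ∈ acc ∨ ∃ g ∈ G, pvBranchPrefix g depth = some x ∧
        (PySem.Set.contains prefixes x ||
          (PySem.List.pyRange 1 (x.length : Int) 1).any
            (fun i => PySem.Set.contains full (x.take i.toNat))) = true := by
  induction G generalizing acc with
  | nil => simp
  | cons g G ih =>
    simp only [List.foldl_cons, List.mem_cons, pvAnchorStep_eq]
    cases hbp : pvBranchPrefix g depth with
    | none =>
      rw [ih acc]
      constructor
      · rintro (h | ⟨g', hg', h⟩)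
        · tauto
        · exact Or.inr ⟨g', Or.inr hg', h⟩
      · rintro (h | ⟨g', (hg' | hg'), h, hc⟩)
        · tauto
        · subst hg'; rw [hbp] at h; exact absurd h (by simp)
        · exact Or.inr ⟨g', hg', h, hc⟩
    | some b =>
      dsimp only
      split
      · rename_i hc
        rw [ih (PySem.Set.add acc b)]
        simp only [PySem.Set.mem_add]
        constructor
        · rintro ((h | h) | ⟨g', hg', h⟩)
          · tauto
          · subst h; exact Or.inr ⟨g, Or.inl rfl, hbp, hc⟩
          · exact Or.inr ⟨g', Or.inr hg', h⟩
        · rintro (h | ⟨g', (hg' | hg'), h, hc'⟩)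
          · tauto
          · subst hg'; rw [hbp] at h; left; right; exact (Option.some_inj.mp h).symm
          · exact Or.inr ⟨g', hg', h, hc'⟩
      · rename_i hc
        rw [ih acc]
        constructor
        · rintro (h | ⟨g', hg', h⟩)
          · tauto
          · exact Or.inr ⟨g', Or.inr hg', h⟩
        · rintro (h | ⟨g', (hg' | hg'), h, hc'⟩)
          · tauto
          · subst hg'; rw [hbp] at h
            cases Option.some_inj.mp h; exact absurd hc' hc
          · exact Or.inr ⟨g', hg', h, hc'⟩

-- B's anchors set has no duplicates
lemma nodup_anchorFold (G : List (List Int)) (full prefixes : PySem.Set (List Int)) (depth : Int)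
    (acc : PySem.Set (List Int)) (hacc : acc.Nodup) :
    (G.foldl (pvAnchorStep full prefixes depth) acc).Nodup := by
  induction G generalizing acc with
  | nil => simpa
  | cons g G ih =>
    simp only [List.foldl_cons, pvAnchorStep_eq]
    apply ih
    cases pvBranchPrefix g depth with
    | none => exact hacc
    | some b =>
      dsimp only
      split
      · exact PySem.Set.nodup_add _ _ hacc
      · exact hacc

-- ===== VERDICT (by name: the statement is the Claim_ definition above) =====
theorem anchor_branches_from_selected_py_spec : Claim_equal_anchor_branches_from_selected_py := by
  intro S G depth _
  show anchor_branches_from_selected_py S G depth = anchor_branches_from_selected_py_alt S G depth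
  unfold anchor_branches_from_selected_py anchor_branches_from_selected_py_alt
  dsimp only
  have hmem : ∀ x, x ∈ PySem.Set.ofList
      ((pvGoldBranches G depth).foldl
        (fun acc gold_branch =>
          if (S.any fun path => pvConsistent path gold_branch) then acc ++ [gold_branch] else acc)
        []) ↔
      x ∈ G.foldl (pvAnchorStep (S.foldl pvIndexStep (PySem.Set.empty, PySem.Set.empty)).1
        (S.foldl pvIndexStep (PySem.Set.empty, PySem.Set.empty)).2 depth) PySem.Set.empty := by
    intro x
    rw [PySem.Set.mem_ofList, mem_anchorFold]
    unfold pvGoldBranches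
    rw [PySem.List.foldl_append_if (fun gb => S.any fun path => pvConsistent path gb)
        (fun gb => gb)]
    simp only [List.map_id', List.nil_append, List.mem_filter]
    rw [mem_goldFold G depth ([], PySem.Set.empty) (by simp [PySem.Set.empty]) x]
    have hemp : ∀ y : List Int, y ∈ (PySem.Set.empty : PySem.Set (List Int)) ↔ False := by
      simp [PySem.Set.empty]
    simp only [hemp, List.not_mem_nil, false_or]
    constructor
    · rintro ⟨⟨g, hg, hbp⟩, hany⟩
      refine ⟨g, hg, hbp, ?_⟩
      rw [covB_iff S x (pvBranchPrefix_ne_nil hbp)]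
      rw [covA_iff] at hany
      obtain ⟨p, hp, h1, _, h3⟩ := hany
      exact ⟨p, hp, h1, h3⟩
    · rintro ⟨g, hg, hbp, hcov⟩
      have hx := pvBranchPrefix_ne_nil hbp
      refine ⟨⟨g, hg, hbp⟩, ?_⟩
      rw [covA_iff]
      rw [covB_iff S x hx] at hcov
      obtain ⟨p, hp, h1, h3⟩ := hcov
      exact ⟨p, hp, h1, hx, h3⟩
  have hperm := (List.perm_ext_iff_of_nodup (PySem.Set.nodup_ofList _)
      (nodup_anchorFold G _ _ depth PySem.Set.empty (by simp [PySem.Set.empty]))).mpr hmem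
  have h2 := PySem.List.sorted_eq_sorted_of_perm _ _ (fun x : List Int => x)
      (fun _ _ h => h) hperm
  convert h2 using 2
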